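-- pv_equiv track=rewrite | github.com/greb/aoc2022 | days/day17.py | cave_profile
-- ===== SOURCE A (Python) =====
-- WIDTH = 7
--
-- def cave_profile(cave):
--     unchecked = set(range(WIDTH))
--     counts = [0]*WIDTH
--     for row in reversed(cave):
--         unchecked -= row
--         for i in unchecked:
--             counts[i] += 1
--         if not unchecked:
--             break
--
--     return tuple(counts)
-- ===== SOURCE B (Python) =====
-- WIDTH = 7
--
-- def cave_profile(cave):
--     rows = list(reversed(cave))
--     counts = []
--     for i in range(WIDTH):
--         c = 0
--         for row in rows:
--             if i in row:
--                 break
--             c += 1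
--         counts.append(c)
--     return tuple(counts)
-- ===== Notes on version B (the rewrite author's own statement) =====
-- stated objective: alternative
-- what changed: B computes each column's depth independently with one counter per column, scanning rows from the top and breaking at the first occupied row, instead of A's single row-major sweep that maintains a shrinking set of unresolved columns and increments all of them per row.
import Mathlib
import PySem

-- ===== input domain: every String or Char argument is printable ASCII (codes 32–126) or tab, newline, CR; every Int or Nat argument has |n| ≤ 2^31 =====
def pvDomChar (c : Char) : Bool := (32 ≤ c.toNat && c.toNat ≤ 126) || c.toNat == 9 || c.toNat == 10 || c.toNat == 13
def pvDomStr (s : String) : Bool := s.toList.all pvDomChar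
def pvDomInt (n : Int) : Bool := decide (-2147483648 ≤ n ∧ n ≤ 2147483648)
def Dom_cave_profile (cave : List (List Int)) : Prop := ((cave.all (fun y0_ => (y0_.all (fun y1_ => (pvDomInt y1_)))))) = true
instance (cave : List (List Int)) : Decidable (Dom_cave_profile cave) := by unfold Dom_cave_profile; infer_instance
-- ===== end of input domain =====

-- B computes each column's depth independently (per-column scan with one counter,
-- breaking at the first occupied row) instead of A's single row-major sweep over a
-- shrinking set of unresolved columns; same cost, different decomposition.

-- ===== PORT A =====
-- for row in reversed(cave): unchecked -= row; counts[i] += 1 for i in unchecked; break if empty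
def pvA_loop (unchecked : List Int) (counts : List Int) : List (List Int) → List Int
  | [] => counts
  | row :: rest =>
    let u := unchecked.filter (fun i => !row.contains i)
    let counts' := u.foldl (fun c i => c.modify i.toNat (· + 1)) counts
    if u.isEmpty then counts' else pvA_loop u counts' rest

def cave_profile (cave : List (List Int)) : List Int :=
  pvA_loop (PySem.Set.ofList (PySem.List.pyRange 0 7 1)) (List.replicate 7 0) cave.reverse

-- ===== PORT B =====
-- inner loop of B: scan rows from the top, break on a row containing i, else count it
def pvB_depth (i : Int) (c : Int) : List (List Int) → Int
  | [] => c
  | row :: rest => if row.contains i then c else pvB_depth i (c + 1) rest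

def cave_profile_alt (cave : List (List Int)) : List Int :=
  let rows := cave.reverse
  (PySem.List.pyRange 0 7 1).foldl (fun counts i => counts ++ [pvB_depth i 0 rows]) []

-- ===== PRECONDITION & SPEC =====
def Spec_cave_profile (cave : List (List Int)) (out : List Int) : Prop := out = cave_profile_alt cave
instance (cave : List (List Int)) (out : List Int) : Decidable (Spec_cave_profile cave out) := by unfold Spec_cave_profile; infer_instance

-- ===== CLAIM (what is proved, stated in full; the proofs are below) =====
def Claim_equal_cave_profile : Prop := ∀ (cave : List (List Int)), Dom_cave_profile cave → Spec_cave_profile cave (cave_profile cave)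

-- ===== LEMMAS AND PROOFS =====

-- B's counter accumulates additively
lemma pvB_depth_shift (i : Int) (c : Int) (rows : List (List Int)) :
    pvB_depth i c rows = c + pvB_depth i 0 rows := by
  induction rows generalizing c with
  | nil => simp [pvB_depth]
  | cons row rest ih =>
    by_cases h : i ∈ row
    · simp [pvB_depth, List.contains_eq_mem, h]
    · simp only [pvB_depth, List.contains_eq_mem, h, decide_false]
      rw [ih (c + 1), ih (0 + 1)]
      simp
      ring

-- one row of A's sweep: the fold of modifies adds 1 exactly at the still-unchecked columns
lemma pvA_fold_getElem? (u : List Int) (counts : List Int) (hnd : u.Nodup)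
    (hpos : ∀ i ∈ u, 0 ≤ i) (j : Nat) :
    (u.foldl (fun c i => c.modify i.toNat (· + 1)) counts)[j]?
      = (counts[j]?).map (fun v => v + if ((j : Int) ∈ u) then 1 else 0) := by
  induction u generalizing counts with
  | nil => cases h : counts[j]? <;> simp [h]
  | cons i rest ih =>
    have hi : 0 ≤ i := hpos i (by simp)
    have hnd' : rest.Nodup := hnd.of_cons
    have hpos' : ∀ x ∈ rest, 0 ≤ x := fun x hx => hpos x (by simp [hx])
    simp only [List.foldl_cons]
    rw [ih _ hnd' hpos']
    by_cases hji : (j : Int) = i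
    · have hjn : i.toNat = j := by omega
      have hir : i ∉ rest := (List.nodup_cons.mp hnd).1
      have hjr : (j : Int) ∉ rest := by rw [hji]; exact hir
      cases h : counts[j]? <;>
        simp [hjn, h, hji, hir]
    · have hjn : i.toNat ≠ j := by omega
      cases h : counts[j]? <;>
        simp [List.getElem?_modify, hjn, h, hji]

-- main invariant of A's loop, stated pointwise against B's per-column depth
lemma pvA_loop_getElem? (rows : List (List Int)) :
    ∀ (u counts : List Int), u.Nodup → (∀ i ∈ u, 0 ≤ i) → ∀ j : Nat,
      (pvA_loop u counts rows)[j]?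
        = (counts[j]?).map
            (fun v => v + if ((j : Int) ∈ u) then pvB_depth (j : Int) 0 rows else 0) := by
  induction rows with
  | nil =>
    intro u counts _ _ j
    simp only [pvA_loop, pvB_depth]
    cases h : counts[j]? <;> simp [h]
  | cons row rest ih =>
    intro u counts hnd hpos j
    have hnd' : (u.filter (fun i => !row.contains i)).Nodup := hnd.filter _
    have hpos' : ∀ i ∈ u.filter (fun i => !row.contains i), 0 ≤ i :=
      fun i hi => hpos i (List.mem_of_mem_filter hi)
    simp only [pvA_loop]
    split
    · next hemp =>
      have hemp' := List.isEmpty_iff.mp hemp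
      rw [pvA_fold_getElem? _ _ hnd' hpos']
      by_cases hju : (j : Int) ∈ u
      · have hcon : (j : Int) ∈ row := by
          by_contra hc
          have hmem : (j : Int) ∈ u.filter (fun i => !row.contains i) := by
            simp [List.mem_filter, hju, hc]
          rw [hemp'] at hmem
          simp at hmem
        cases h : counts[j]? <;> simp [h, hemp', hju, pvB_depth, hcon]
      · cases h : counts[j]? <;> simp [h, hemp', hju]
    · next hemp =>
      rw [ih _ _ hnd' hpos', pvA_fold_getElem? _ _ hnd' hpos']
      by_cases hju : (j : Int) ∈ u
      · by_cases hcon : (j : Int) ∈ row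
        · have hjf : (j : Int) ∉ u.filter (fun i => !row.contains i) := by
            simp [List.mem_filter, hcon]
          cases h : counts[j]? <;> simp [h, hjf, hju, pvB_depth, hcon]
        · have hjf : (j : Int) ∈ u.filter (fun i => !row.contains i) := by
            simp [List.mem_filter, hju, hcon]
          cases h : counts[j]? <;>
            (simp [h, hjf, hju, pvB_depth, hcon, pvB_depth_shift ((j : Int)) 1]; try ring)
      · have hjf : (j : Int) ∉ u.filter (fun i => !row.contains i) :=
          fun hf => hju (List.mem_of_mem_filter hf)
        cases h : counts[j]? <;> simp [h, hjf, hju]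

lemma pvRange7 : PySem.List.pyRange 0 7 1 = [0, 1, 2, 3, 4, 5, 6] := by decide

lemma pvSet7 : PySem.Set.ofList (PySem.List.pyRange 0 7 1) = [0, 1, 2, 3, 4, 5, 6] := by decide

lemma alt_eq_map (cave : List (List Int)) :
    cave_profile_alt cave
      = ([0, 1, 2, 3, 4, 5, 6] : List Int).map (fun i => pvB_depth i 0 cave.reverse) := by
  unfold cave_profile_alt
  rw [pvRange7, PySem.List.foldl_append_singleton_eq_map]
  simp

-- ===== VERDICT (by name: the statement is the Claim_ definition above) =====
theorem cave_profile_spec : Claim_equal_cave_profile := by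
  intro cave _
  unfold Spec_cave_profile cave_profile
  rw [pvSet7, alt_eq_map]
  apply List.ext_getElem?
  intro j
  rw [pvA_loop_getElem? _ _ _ (by decide) (by decide) j]
  by_cases hj : j < 7
  · interval_cases j <;> simp
  · have h1 : (List.replicate 7 (0 : Int))[j]? = none := by
      rw [List.getElem?_eq_none] <;> simp <;> omega
    have h2 : (([0, 1, 2, 3, 4, 5, 6] : List Int).map
        (fun i => pvB_depth i 0 cave.reverse))[j]? = none := by
      rw [List.getElem?_eq_none] <;> simp <;> omega
    rw [h1, h2]
    rfl
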